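-- pv_equiv track=rewrite | github.com/wasd314/consecutive-power-sum | power1/ref_dict_py/main.py | solve_e
-- ===== SOURCE A (Python) =====
-- def solve_e(n: int, e: int):
--     """
--     e = e の解を列挙する
--     連想配列を用いて Θ(n^{1/e}) 時間
--     """
--     # floor(n^{1/e}) + 1
--     m = next(i for i in range(n + 2) if i**e > n)
--     assert (m - 1)**e <= n < m**e
--
--     b = [0] * m
--     for i in range(1, m):
--         b[i] = b[i - 1] + i**e
--     to_i = {bi: i for i, bi in enumerate(b)}
--
--     ans = []
--     for l in range(1, m):
--         r = to_i.get(b[l - 1] + n)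
--         if r is not None:
--             ans.append((e, l, r))
--     return ans
-- ===== SOURCE B (Python) =====
-- def solve_e(n: int, e: int):
--     """
--     e = e の解を列挙する
--     Two-pointer sweep over the prefix sums instead of a hash table.
--     """
--     # floor(n^{1/e}) + 1
--     m = next(i for i in range(n + 2) if i**e > n)
--     assert (m - 1)**e <= n < m**e
--
--     b = [0]
--     for i in range(1, m):
--         b.append(b[-1] + i**e)
--
--     ans = []
--     r = 0
--     for l in range(1, m):
--         target = b[l - 1] + n
--         while r < m - 1 and b[r] < target:
--             r += 1
--         if b[r] == target:
--             ans.append((e, l, r))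
--     return ans
-- ===== Notes on version B (the rewrite author's own statement) =====
-- stated objective: alternative
-- what changed: Replaces the hash table to_i and its m independent lookups with a two-pointer sweep: a single forward-moving index r advances over the strictly increasing prefix-sum array while b[r] < b[l-1]+n, so no dictionary is built or queried.
import Mathlib
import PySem

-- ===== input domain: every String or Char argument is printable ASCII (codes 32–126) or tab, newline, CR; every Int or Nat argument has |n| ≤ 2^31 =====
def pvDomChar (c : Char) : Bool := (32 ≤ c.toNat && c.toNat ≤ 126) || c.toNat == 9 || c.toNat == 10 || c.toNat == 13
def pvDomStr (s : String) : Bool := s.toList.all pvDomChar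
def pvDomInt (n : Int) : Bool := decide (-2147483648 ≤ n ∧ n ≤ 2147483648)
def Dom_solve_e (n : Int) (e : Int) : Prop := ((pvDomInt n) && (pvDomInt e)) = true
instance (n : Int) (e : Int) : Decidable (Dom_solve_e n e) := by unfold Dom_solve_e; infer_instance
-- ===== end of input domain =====

-- B replaces A's hash-table lookups with a two-pointer sweep over the prefix sums (alternative
-- data structure, same asymptotic cost); equivalence is about the return value.
-- Python's list/dict are O(1)-per-op mutable containers, so both ports use Array / Std.HashMap
-- for their internal state (every index access is in range there, so Array.getD is exact).

-- m = next(i for i in range(n + 2) if i**e > n), iterated lazily exactly as Python's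
-- generator does; none = StopIteration (excluded by Pre_). Shared by both ports (the
-- Python line is identical in A and B).
def pvNextM (n e i : Int) : Option Int :=
  if i < n + 2 then
    if n < i ^ e.toNat then some i else pvNextM n e (i + 1)
  else none
termination_by (n + 2 - i).toNat
decreasing_by omega

-- ===== PORT A =====
-- Under Pre_ the assert always holds, so it is a no-op here.
def solve_e (n : Int) (e : Int) : List (Int × Int × Int) :=
  match pvNextM n e 0 with
  | none => []  -- Python raises StopIteration here (outside Pre_)
  | some m =>
    -- b = [0]*m; for i in range(1, m): b[i] = b[i-1] + i**e   (indices always in range)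
    let b : Array Int := (PySem.List.pyRange 1 m 1).foldl
      (fun b i => b.setIfInBounds i.toNat (b.getD (i - 1).toNat 0 + i ^ e.toNat))
      (Array.replicate m.toNat 0)
    -- to_i = {bi: i for i, bi in enumerate(b)}  (the index i is carried as a counter,
    -- which is exactly what enumerate does; a tail-recursive fold so it runs on big b)
    let to_i : Std.HashMap Int Int :=
      (b.toList.foldl (fun (st : Std.HashMap Int Int × Int) bi =>
        (st.1.insert bi st.2, st.2 + 1)) (∅, (0 : Int))).1
    -- for l in range(1, m): r = to_i.get(b[l-1] + n); if r is not None: ans.append((e, l, r))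
    (PySem.List.pyRange 1 m 1).foldl
      (fun ans l =>
        match to_i[b.getD (l - 1).toNat 0 + n]? with
        | some r => ans ++ [(e, l, r)]
        | none => ans)
      []

-- ===== PORT B =====
-- while r < m - 1 and b[r] < target: r += 1
def advR (b : Array Int) (m target r : Int) : Int :=
  if h : r < m - 1 ∧ b.getD r.toNat 0 < target then advR b m target (r + 1) else r
termination_by (m - 1 - r).toNat
decreasing_by omega

def solve_e_alt (n : Int) (e : Int) : List (Int × Int × Int) :=
  match pvNextM n e 0 with
  | none => []  -- Python raises StopIteration here (outside Pre_)
  | some m =>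
    -- b = [0]; for i in range(1, m): b.append(b[-1] + i**e)
    let b : Array Int := (PySem.List.pyRange 1 m 1).foldl
      (fun b i => b.push (b.getD (b.size - 1) 0 + i ^ e.toNat)) #[0]
    -- r = 0; for l in range(1, m): advance r, then test b[r] == target
    ((PySem.List.pyRange 1 m 1).foldl
      (fun (st : List (Int × Int × Int) × Int) l =>
        let target := b.getD (l - 1).toNat 0 + n
        let r := advR b m target st.2
        if b.getD r.toNat 0 = target then (st.1 ++ [(e, l, r)], r) else (st.1, r))
      ([], 0)).1

-- ===== PRECONDITION & SPEC =====
-- Pre_ admits exactly the inputs on which the Python A returns: e ≤ 0 raises (StopIteration /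
-- ZeroDivisionError / AssertionError), n ≤ -2 raises StopIteration, and n = -1 with even e
-- fails the assert ((-1)**e = 1 ≤ -1 is false); n = -1 with odd e returns [].
def Pre_solve_e (n : Int) (e : Int) : Prop :=
  1 ≤ e ∧ (0 ≤ n ∨ (n = -1 ∧ e % 2 = 1))
instance (n : Int) (e : Int) : Decidable (Pre_solve_e n e) := by unfold Pre_solve_e; infer_instance

def pvWitness_solve_e : Int × Int := (9, 2)

def Spec_solve_e (n : Int) (e : Int) (out : List (Int × Int × Int)) : Prop := out = solve_e_alt n e
instance (n : Int) (e : Int) (out : List (Int × Int × Int)) : Decidable (Spec_solve_e n e out) := by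
  unfold Spec_solve_e; infer_instance

-- ===== CLAIM (what is proved, stated in full; the proofs are below) =====
def Claim_equal_solve_e : Prop :=
  ∀ (n : Int) (e : Int), Dom_solve_e n e → Pre_solve_e n e → Spec_solve_e n e (solve_e n e)

-- ===== LEMMAS AND PROOFS =====

-- prefix sums of e-th powers: pvS k i = 1^k + 2^k + … + i^k
def pvS (k : Nat) : Nat → Int
  | 0 => 0
  | i + 1 => pvS k i + ((i : Int) + 1) ^ k

lemma pvS_strictMono (k : Nat) : StrictMono (pvS k) := by
  apply strictMono_nat_of_lt_succ
  intro i
  have hp : (0 : Int) < ((i : Int) + 1) ^ k := pow_pos (by positivity) _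
  show pvS k i < pvS k i + ((i : Int) + 1) ^ k
  omega

-- Array bridges
lemma agetD (a : Array Int) (i : Nat) (d : Int) : a.getD i d = a.toList.getD i d := by
  simp [Array.getD, List.getD]
  split
  · simp [*]
  · rw [Array.getElem?_eq_none (by omega)]; rfl

lemma amk_getD (l : List Int) (i : Nat) (d : Int) : (Array.mk l).getD i d = l.getD i d := by
  rw [agetD]

lemma amk_set (l : List Int) (i : Nat) (v : Int) :
    (Array.mk l).setIfInBounds i v = Array.mk (l.set i v) := by
  apply Array.ext'
  simp

lemma amk_push (l : List Int) (v : Int) : (Array.mk l).push v = Array.mk (l ++ [v]) := by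
  apply Array.ext'
  simp

lemma arepl (mN : Nat) : (Array.replicate mN (0 : Int)) = Array.mk (List.replicate mN 0) := by
  apply Array.ext'
  simp

lemma getD_bL (k mN : Nat) (j : Int) (h0 : 0 ≤ j) (h1 : j < (mN : Int)) :
    (Array.mk ((List.range mN).map (pvS k))).getD j.toNat 0 = pvS k j.toNat := by
  rw [amk_getD]
  exact PySem.List.getD_map_range _ _ _ _ (by omega)

-- the properties of the generator search
lemma pvNextM_none (n e : Int) (i : Int) (h : pvNextM n e i = none) :
    ∀ x : Int, i ≤ x → x < n + 2 → ¬ n < x ^ e.toNat := by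
  have main : ∀ (fuel : Nat) (i : Int), (n + 2 - i).toNat ≤ fuel → pvNextM n e i = none →
      ∀ x : Int, i ≤ x → x < n + 2 → ¬ n < x ^ e.toNat := by
    intro fuel
    induction fuel with
    | zero => intro i hf _ x hx1 hx2; omega
    | succ fuel ih =>
      intro i hf h x hx1 hx2
      rw [pvNextM] at h
      split_ifs at h with h1 h2
      · rcases eq_or_lt_of_le hx1 with rfl | hlt
        · exact h2
        · exact ih (i + 1) (by omega) h x (by omega) hx2
      · omega
  exact main (n + 2 - i).toNat i le_rfl h

lemma pvNextM_some (n e : Int) (i m : Int) (h : pvNextM n e i = some m) :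
    i ≤ m ∧ m < n + 2 ∧ n < m ^ e.toNat := by
  have main : ∀ (fuel : Nat) (i : Int), (n + 2 - i).toNat ≤ fuel → pvNextM n e i = some m →
      i ≤ m ∧ m < n + 2 ∧ n < m ^ e.toNat := by
    intro fuel
    induction fuel with
    | zero =>
      intro i hf h
      rw [pvNextM, if_neg (by omega)] at h
      exact absurd h (by simp)
    | succ fuel ih =>
      intro i hf h
      rw [pvNextM] at h
      split_ifs at h with h1 h2
      · obtain rfl := Option.some_injective _ h
        exact ⟨le_rfl, h1, h2⟩
      · obtain ⟨ha, hb, hc⟩ := ih (i + 1) (by omega) h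
        exact ⟨by omega, hb, hc⟩
  exact main (n + 2 - i).toNat i le_rfl h

-- B's prefix-sum array
lemma bB_eq (k : Nat) : ∀ (j : Nat), 1 ≤ j →
    (PySem.List.pyRange 1 (j : Int) 1).foldl
      (fun b i => b.push (b.getD (b.size - 1) 0 + i ^ k)) #[0]
    = Array.mk ((List.range j).map (pvS k)) := by
  intro j
  induction j with
  | zero => omega
  | succ j ih =>
    intro _
    by_cases hj : j = 0
    · subst hj
      rw [PySem.List.pyRange_one_eq_nil (by norm_num : ((1 : Nat) : Int) ≤ 1)]
      simp [pvS]
    · obtain ⟨jj, rfl⟩ : ∃ jj, j = jj + 1 := ⟨j - 1, by omega⟩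
      have hcast : (((jj + 1 + 1 : Nat)) : Int) = ((jj + 1 : Nat) : Int) + 1 := by push_cast; ring
      rw [hcast, PySem.List.pyRange_one_succ_right (by push_cast; omega), List.foldl_append,
        ih (by omega), List.foldl_cons, List.foldl_nil, amk_push]
      have hsz : (Array.mk ((List.range (jj + 1)).map (pvS k))).size = jj + 1 := by simp
      rw [hsz, amk_getD]
      have hget : ((List.range (jj + 1)).map (pvS k)).getD (jj + 1 - 1) 0 = pvS k jj :=
        PySem.List.getD_map_range _ _ _ _ (by omega)
      rw [hget, List.range_succ (n := jj + 1)]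
      simp [pvS]

-- A's prefix-sum array
lemma bA_aux (k mN : Nat) : ∀ (j : Nat), j ≤ mN →
    (PySem.List.pyRange 1 (j : Int) 1).foldl
      (fun b i => b.setIfInBounds i.toNat (b.getD (i - 1).toNat 0 + i ^ k))
      (Array.replicate mN 0)
    = Array.mk ((List.range j).map (pvS k) ++ List.replicate (mN - j) 0) := by
  intro j
  induction j with
  | zero =>
    intro _
    rw [PySem.List.pyRange_one_eq_nil (by norm_num : ((0 : Nat) : Int) ≤ 1), arepl]
    simp
  | succ j ih =>
    intro h
    by_cases hj : j = 0
    · subst hj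
      obtain ⟨mm, rfl⟩ : ∃ mm, mN = mm + 1 := ⟨mN - 1, by omega⟩
      rw [PySem.List.pyRange_one_eq_nil (by norm_num : ((1 : Nat) : Int) ≤ 1)]
      rw [arepl]
      simp [pvS, List.replicate_succ]
    · obtain ⟨jj, rfl⟩ : ∃ jj, j = jj + 1 := ⟨j - 1, by omega⟩
      have hcast : (((jj + 1 + 1 : Nat)) : Int) = ((jj + 1 : Nat) : Int) + 1 := by push_cast; ring
      rw [hcast, PySem.List.pyRange_one_succ_right (by push_cast; omega), List.foldl_append,
        ih (by omega), List.foldl_cons, List.foldl_nil]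
      have hsub : (((jj + 1 : Nat) : Int) - 1).toNat = jj := by omega
      have htn : ((jj + 1 : Nat) : Int).toNat = jj + 1 := by omega
      rw [hsub, htn, amk_getD, amk_set]
      have hget : (((List.range (jj + 1)).map (pvS k)) ++ List.replicate (mN - (jj + 1)) 0).getD jj 0
          = pvS k jj := by
        rw [List.getD_append _ _ _ _ (by simp)]
        exact PySem.List.getD_map_range _ _ _ _ (by omega)
      rw [hget]
      obtain ⟨rest, hrest⟩ : ∃ rest, mN - (jj + 1) = rest + 1 := ⟨mN - (jj + 2), by omega⟩
      rw [hrest, List.replicate_succ, List.set_append]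
      simp only [List.length_map, List.length_range]
      rw [if_neg (by omega)]
      simp only [Nat.sub_self, List.set_cons_zero]
      rw [List.range_succ (n := jj + 1)]
      have : mN - (jj + 1 + 1) = rest := by omega
      simp [this, pvS, List.append_assoc]

lemma bA_eq (k mN : Nat) :
    (PySem.List.pyRange 1 (mN : Int) 1).foldl
      (fun b i => b.setIfInBounds i.toNat (b.getD (i - 1).toNat 0 + i ^ k))
      (Array.replicate mN 0)
    = Array.mk ((List.range mN).map (pvS k)) := by
  have := bA_aux k mN mN le_rfl
  simpa using this

-- A's dictionary, after b is rewritten to the reference list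
def pvDict (k mN : Nat) : Std.HashMap Int Int :=
  (PySem.List.enumerate ((List.range mN).map (pvS k)) 0).foldl
    (fun d p => d.insert p.2 p.1) ∅

lemma counter_fold : ∀ (bL : List Int) (d : Std.HashMap Int Int) (i0 : Int),
    bL.foldl (fun (st : Std.HashMap Int Int × Int) bi => (st.1.insert bi st.2, st.2 + 1)) (d, i0)
    = ((PySem.List.enumerate bL i0).foldl (fun d p => d.insert p.2 p.1) d,
        i0 + bL.length) := by
  intro bL
  induction bL with
  | nil => intro d i0; simp [PySem.List.enumerate_nil]
  | cons x t ih =>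
    intro d i0
    rw [List.foldl_cons, ih (d.insert x i0) (i0 + 1), PySem.List.enumerate_cons,
      List.foldl_cons]
    refine Prod.ext rfl ?_
    simp
    ring

lemma pvDict_eq (k mN : Nat) :
    (((Array.mk ((List.range mN).map (pvS k))).toList).foldl
      (fun (st : Std.HashMap Int Int × Int) bi => (st.1.insert bi st.2, st.2 + 1))
      (∅, (0 : Int))).1 = pvDict k mN := by
  show (((List.range mN).map (pvS k)).foldl
      (fun (st : Std.HashMap Int Int × Int) bi => (st.1.insert bi st.2, st.2 + 1))
      (∅, (0 : Int))).1 = pvDict k mN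
  rw [counter_fold]
  rfl

lemma hm_untouched (l : List (Int × Int)) (v : Int) (hv : ∀ p ∈ l, p.2 ≠ v) :
    ∀ d : Std.HashMap Int Int, (l.foldl (fun d p => d.insert p.2 p.1) d)[v]? = d[v]? := by
  induction l with
  | nil => intro d; rfl
  | cons a t ih =>
    intro d
    rw [List.foldl_cons, ih (fun p hp => hv p (List.mem_cons_of_mem a hp)),
      Std.HashMap.getElem?_insert]
    rw [if_neg (by simpa using hv a (List.mem_cons_self))]

lemma hm_found : ∀ (l : List (Int × Int)), (l.map (·.2)).Nodup → ∀ p0 : Int × Int, p0 ∈ l →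
    ∀ d : Std.HashMap Int Int, (l.foldl (fun d p => d.insert p.2 p.1) d)[p0.2]? = some p0.1 := by
  intro l
  induction l with
  | nil => intro _ p0 hp0; exact absurd hp0 (List.not_mem_nil)
  | cons a t ih =>
    intro hnd p0 hp0 d
    rw [List.foldl_cons]
    have hnd' : ((a.2) :: t.map (·.2)).Nodup := by simpa using hnd
    rcases List.mem_cons.mp hp0 with rfl | hp0t
    · have hfresh : ∀ p ∈ t, p.2 ≠ p0.2 := by
        intro p hp hEq
        exact (List.nodup_cons.mp hnd').1 (hEq ▸ List.mem_map_of_mem (f := (·.2)) hp)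
      rw [hm_untouched t p0.2 hfresh, Std.HashMap.getElem?_insert_self]
    · exact ih (List.nodup_cons.mp hnd').2 p0 hp0t _

lemma pvDict_get?_some (k mN i : Nat) (hi : i < mN) :
    (pvDict k mN)[pvS k i]? = some (i : Int) := by
  have hnd : ((PySem.List.enumerate ((List.range mN).map (pvS k)) 0).map (·.2)).Nodup := by
    rw [PySem.List.map_snd_enumerate]
    exact (List.nodup_range).map ((pvS_strictMono k).injective)
  have hp0 : ((i : Int), pvS k i) ∈ PySem.List.enumerate ((List.range mN).map (pvS k)) 0 := by
    rw [PySem.List.mem_enumerate_iff]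
    exact ⟨i, by simpa using hi, by simp⟩
  exact hm_found _ hnd ((i : Int), pvS k i) hp0 ∅

lemma pvDict_get?_none (k mN : Nat) (v : Int) (hv : ∀ i, i < mN → pvS k i ≠ v) :
    (pvDict k mN)[v]? = none := by
  have hfresh : ∀ p ∈ PySem.List.enumerate ((List.range mN).map (pvS k)) 0, p.2 ≠ v := by
    intro p hp
    rw [PySem.List.mem_enumerate_iff] at hp
    obtain ⟨j, hj, rfl⟩ := hp
    have hjm : j < mN := by simpa using hj
    simpa using hv j hjm
  unfold pvDict
  rw [hm_untouched _ v hfresh ∅]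
  exact Std.HashMap.getElem?_empty

lemma advR_spec (b : Array Int) (m t r : Int) (h0 : 0 ≤ r) (h1 : r ≤ m - 1) :
    r ≤ advR b m t r ∧ advR b m t r ≤ m - 1 ∧
      (∀ j : Int, r ≤ j → j < advR b m t r → b.getD j.toNat 0 < t) ∧
      (advR b m t r = m - 1 ∨ ¬ b.getD (advR b m t r).toNat 0 < t) := by
  have main : ∀ (fuel : Nat) (r : Int), (m - 1 - r).toNat ≤ fuel → 0 ≤ r → r ≤ m - 1 →
      r ≤ advR b m t r ∧ advR b m t r ≤ m - 1 ∧
        (∀ j : Int, r ≤ j → j < advR b m t r → b.getD j.toNat 0 < t) ∧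
        (advR b m t r = m - 1 ∨ ¬ b.getD (advR b m t r).toNat 0 < t) := by
    intro fuel
    induction fuel with
    | zero =>
      intro r hf h0 h1
      have hr : r = m - 1 := by omega
      rw [advR, dif_neg (fun hc => by omega)]
      exact ⟨le_rfl, h1, by omega, Or.inl hr⟩
    | succ fuel ih =>
      intro r hf h0 h1
      by_cases hc : r < m - 1 ∧ b.getD r.toNat 0 < t
      · rw [advR, dif_pos hc]
        obtain ⟨ih1, ih2, ih3, ih4⟩ := ih (r + 1) (by omega) (by omega) (by omega)
        refine ⟨by omega, ih2, ?_, ih4⟩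
        intro j hj1 hj2
        rcases eq_or_lt_of_le hj1 with h | h
        · rw [← h]; exact hc.2
        · exact ih3 j (by omega) hj2
      · rw [advR, dif_neg hc]
        refine ⟨le_rfl, h1, by omega, ?_⟩
        by_cases hr : r = m - 1
        · exact Or.inl hr
        · exact Or.inr (fun hlt => hc ⟨by omega, hlt⟩)
  exact main (m - 1 - r).toNat r le_rfl h0 h1

-- the main loop equivalence: dict lookup vs two-pointer sweep
lemma loop_eq (k mN : Nat) (nn ee : Int) :
    ∀ (cnt : Nat) (l : Int), 1 ≤ l → l ≤ (mN : Int) → ((mN : Int) - l).toNat = cnt →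
    ∀ (r : Int) (acc : List (Int × Int × Int)), 0 ≤ r → r ≤ (mN : Int) - 1 →
      (∀ j : Nat, (j : Int) < r → pvS k j < pvS k (l - 1).toNat + nn) →
      ((PySem.List.pyRange l (mN : Int) 1).foldl
        (fun (st : List (Int × Int × Int) × Int) l =>
          let target := (Array.mk ((List.range mN).map (pvS k))).getD (l - 1).toNat 0 + nn
          let r := advR (Array.mk ((List.range mN).map (pvS k))) (mN : Int) target st.2
          if (Array.mk ((List.range mN).map (pvS k))).getD r.toNat 0 = target
          then (st.1 ++ [(ee, l, r)], r) else (st.1, r))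
        (acc, r)).1
      = (PySem.List.pyRange l (mN : Int) 1).foldl
        (fun ans l =>
          match (pvDict k mN)[(Array.mk ((List.range mN).map (pvS k))).getD (l - 1).toNat 0 + nn]? with
          | some r => ans ++ [(ee, l, r)]
          | none => ans)
        acc := by
  intro cnt
  induction cnt using Nat.strong_induction_on with
  | _ cnt ih =>
    intro l hl1 hl2 hcnt r acc h0 h1 hinv
    rcases eq_or_lt_of_le hl2 with heq | hlt
    · rw [PySem.List.pyRange_one_eq_nil (le_of_eq heq.symm)]
      rfl
    · rw [PySem.List.pyRange_one_cons hlt]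
      simp only [List.foldl_cons]
      have hget1 : (Array.mk ((List.range mN).map (pvS k))).getD (l - 1).toNat 0
          = pvS k (l - 1).toNat := getD_bL k mN (l - 1) (by omega) (by omega)
      obtain ⟨ha1, ha2, ha3, ha4⟩ :=
        advR_spec (Array.mk ((List.range mN).map (pvS k))) (mN : Int)
          ((Array.mk ((List.range mN).map (pvS k))).getD (l - 1).toNat 0 + nn) r h0 (by omega)
      set t := (Array.mk ((List.range mN).map (pvS k))).getD (l - 1).toNat 0 + nn with ht
      set r' := advR (Array.mk ((List.range mN).map (pvS k))) (mN : Int) t r with hr'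
      have hr'lt : r' < (mN : Int) := by omega
      have hget2 : (Array.mk ((List.range mN).map (pvS k))).getD r'.toNat 0
          = pvS k r'.toNat := getD_bL k mN r' (by omega) hr'lt
      have hALL : ∀ j : Nat, (j : Int) < r' → pvS k j < t := by
        intro j hj
        by_cases hjr : (j : Int) < r
        · have := hinv j hjr; omega
        · have := ha3 (j : Int) (by omega) hj
          rwa [getD_bL k mN (j : Int) (by omega) (by omega), Int.toNat_natCast] at this
      have hnext : ∀ j : Nat, (j : Int) < r' → pvS k j < pvS k (l + 1 - 1).toNat + nn := by
        intro j hj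
        have h2 : pvS k (l - 1).toNat < pvS k (l + 1 - 1).toNat :=
          pvS_strictMono k (by omega)
        have := hALL j hj
        rw [ht, hget1] at this
        omega
      have hcnt' : (((mN : Int)) - (l + 1)).toNat < cnt := by omega
      by_cases hmatch : pvS k r'.toNat = t
      · have hsome : (pvDict k mN)[t]? = some r' := by
          have := pvDict_get?_some k mN r'.toNat (by omega)
          rw [hmatch] at this
          rwa [Int.toNat_of_nonneg (by omega)] at this
        simp only [hsome, hget2, hmatch]
        exact ih _ hcnt' (l + 1) (by omega) (by omega) rfl r' (acc ++ [(ee, l, r')])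
          (by omega) (by omega) hnext
      · have hnone : (pvDict k mN)[t]? = none := by
          apply pvDict_get?_none
          intro i hi hit
          by_cases hir : (i : Int) < r'
          · have := hALL i hir; omega
          · rcases lt_or_eq_of_le (le_of_not_gt hir) with hgt | hE
            · rcases ha4 with hend | hge
              · omega
              · rw [hget2] at hge
                have : pvS k r'.toNat < pvS k i := pvS_strictMono k (by omega)
                omega
            · have : i = r'.toNat := by omega
              rw [this] at hit
              exact hmatch hit
        simp only [hnone, hget2, if_neg hmatch]
        exact ih _ hcnt' (l + 1) (by omega) (by omega) rfl r' acc (by omega) (by omega) hnext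

-- ===== VERDICT (by name: the statement is the Claim_ definition above) =====
theorem solve_e_spec : Claim_equal_solve_e := by
  intro n e _ hPre
  unfold Spec_solve_e
  obtain ⟨he, hn⟩ := hPre
  have hk : e.toNat ≠ 0 := by omega
  cases hfind : pvNextM n e 0 with
  | none =>
    exfalso
    have hnone := pvNextM_none n e 0 hfind
    rcases hn with hn | ⟨hn, _⟩
    · refine hnone (n + 1) (by omega) (by omega) ?_
      have : n + 1 ≤ (n + 1) ^ e.toNat := le_self_pow₀ (by omega) hk
      omega
    · refine hnone 0 le_rfl (by omega) ?_
      rw [zero_pow hk]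
      omega
  | some mv =>
    obtain ⟨hmv0, hmv1, hmv2⟩ := pvNextM_some n e 0 mv hfind
    obtain ⟨mN, rfl⟩ : ∃ mN : Nat, mv = (mN : Int) :=
      ⟨mv.toNat, (Int.toNat_of_nonneg hmv0).symm⟩
    simp only [solve_e, solve_e_alt, hfind]
    rcases hn with hn | ⟨hn, _⟩
    · -- 0 ≤ n : the interesting case
      have hm1 : 1 ≤ mN := by
        rcases Nat.eq_zero_or_pos mN with h0 | h1
        · subst h0
          norm_num [zero_pow hk] at hmv2
          omega
        · exact h1
      simp only [Int.toNat_natCast]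
      rw [bA_eq e.toNat mN, bB_eq e.toNat mN hm1, pvDict_eq]
      exact (loop_eq e.toNat mN n e (((mN : Int)) - 1).toNat 1 (by omega) (by exact_mod_cast hm1)
        rfl 0 [] le_rfl (by omega) (fun j hj => by omega)).symm
    · -- n = -1 : m = 0, both loops are empty
      have hmN : mN = 0 := by omega
      subst hmN
      simp
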